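-- pv_equiv track=rewrite | github.com/humancipher/Programming_Contest | Programming_Contest/AtCoder/other/code-festival/code-festival-2014-final/code-festival-2014-final_E.py | solve
-- ===== SOURCE A (Python) =====
-- def solve(R,N):
--     ans = N
--     fugo = ""
--     for i in range(N-1):
--         if R[i] < R[i+1]:
--             now = "plus"
--         elif R[i] > R[i+1]:
--             now = "minus"
--         else:
--             now = "zero"
--         if now == "zero":
--             ans -= 1
--         else:
--             if fugo != "":
--                 if not((fugo,now) == ("plus","minus") or (fugo,now) == ("minus","plus")):
--                     ans -= 1
--             fugo = now
--     if ans >= 3: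
--         return ans
--     else:
--         return 0
-- ===== SOURCE B (Python) =====
-- def solve(R, N):
--     # Run-length compress the prefix (plateaus vanish), then scan windows
--     # of three over the compressed sequence counting direction changes.
--     if N < 3:
--         return 0
--     comp = []
--     for x in R[:N]:
--         if not comp or comp[-1] != x:
--             comp.append(x)
--     if len(comp) < 2:
--         return 0
--     changes = sum(1 for a, b, c in zip(comp, comp[1:], comp[2:])
--                   if (a < b) != (b < c))
--     ans = 2 + changes
--     return ans if ans >= 3 else 0
-- ===== Notes on version B (the rewrite author's own statement) =====
-- stated objective: alternative
-- what changed: Instead of A's single loop threading the last nonzero comparison sign through mutable state while decrementing from N, B run-length-compresses the prefix R[:N] so plateaus disappear, then counts direction alternations over sliding windows of three consecutive compressed values and returns 2 plus that count (0 when below 3).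
import Mathlib
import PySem

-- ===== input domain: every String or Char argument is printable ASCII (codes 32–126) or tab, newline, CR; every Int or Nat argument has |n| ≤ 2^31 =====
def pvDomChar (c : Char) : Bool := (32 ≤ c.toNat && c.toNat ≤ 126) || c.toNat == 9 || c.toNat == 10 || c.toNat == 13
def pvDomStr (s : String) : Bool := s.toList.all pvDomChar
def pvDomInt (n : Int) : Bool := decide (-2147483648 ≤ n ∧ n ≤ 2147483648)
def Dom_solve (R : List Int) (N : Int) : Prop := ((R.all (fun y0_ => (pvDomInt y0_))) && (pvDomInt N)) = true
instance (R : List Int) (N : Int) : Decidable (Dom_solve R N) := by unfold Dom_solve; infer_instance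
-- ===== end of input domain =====

-- B run-length-compresses R[:N] and counts direction changes over windows of three
-- compressed values (objective: alternative algorithm, same cost).

-- ===== PORT A =====
def solve (R : List Int) (N : Int) : Int :=
  let st := (PySem.List.pyRange 0 (N - 1) 1).foldl
    (fun (st : Int × String) i =>
      let now :=
        if PySem.List.pyGetD R i 0 < PySem.List.pyGetD R (i + 1) 0 then "plus"
        else if PySem.List.pyGetD R i 0 > PySem.List.pyGetD R (i + 1) 0 then "minus"
        else "zero"
      if now = "zero" then (st.1 - 1, st.2)
      else
        (if st.2 ≠ "" ∧ ¬((st.2, now) = ("plus", "minus") ∨ (st.2, now) = ("minus", "plus"))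
         then st.1 - 1 else st.1, now))
    (N, "")
  if st.1 ≥ 3 then st.1 else 0

-- ===== PORT B =====
def solve_alt (R : List Int) (N : Int) : Int :=
  if N < 3 then 0
  else
    let comp := (PySem.List.slice R none (some N)).foldl
      (fun (acc : List Int) x =>
        match acc.getLast? with
        | none => acc ++ [x]
        | some y => if y ≠ x then acc ++ [x] else acc) []
    if (comp.length : Int) < 2 then 0
    else
      let changes : Int := ((comp.zip (PySem.List.slice comp (some 1) none)).zip
          (PySem.List.slice comp (some 2) none)).foldl
        (fun c t => if (decide (t.1.1 < t.1.2) != decide (t.1.2 < t.2)) = true then c + 1 else c) 0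
      let ans := 2 + changes
      if ans ≥ 3 then ans else 0

-- ===== PRECONDITION & SPEC =====
-- Pre_ excludes exactly the inputs where Python A raises IndexError (R[i] accessed for i up to N-1).
def Pre_solve (R : List Int) (N : Int) : Prop := N ≤ (R.length : Int) ∨ N ≤ 1
instance (R : List Int) (N : Int) : Decidable (Pre_solve R N) := by unfold Pre_solve; infer_instance
def pvWitness_solve : List Int × Int := ([1, 2, 3, 2], 4)

def Spec_solve (R : List Int) (N : Int) (out : Int) : Prop := out = solve_alt R N
instance (R : List Int) (N : Int) (out : Int) : Decidable (Spec_solve R N out) := by unfold Spec_solve; infer_instance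

-- ===== CLAIM (what is proved, stated in full; the proofs are below) =====
def Claim_equal_solve : Prop := ∀ (R : List Int) (N : Int), Dom_solve R N → Pre_solve R N → Spec_solve R N (solve R N)

-- ===== LEMMAS AND PROOFS =====

-- the A-side loop body, syntactically identical to the lambda inside `solve`
def pvStepA (R : List Int) (st : Int × String) (i : Int) : Int × String :=
  let now :=
    if PySem.List.pyGetD R i 0 < PySem.List.pyGetD R (i + 1) 0 then "plus"
    else if PySem.List.pyGetD R i 0 > PySem.List.pyGetD R (i + 1) 0 then "minus"
    else "zero"
  if now = "zero" then (st.1 - 1, st.2)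
  else
    (if st.2 ≠ "" ∧ ¬((st.2, now) = ("plus", "minus") ∨ (st.2, now) = ("minus", "plus"))
     then st.1 - 1 else st.1, now)

-- A's nonzero sign sequence over a list of indices
def pvSig (R : List Int) (is : List Int) : List String :=
  (is.filter (fun i => PySem.List.pyGetD R i 0 != PySem.List.pyGetD R (i + 1) 0)).map
    (fun i => if PySem.List.pyGetD R i 0 < PySem.List.pyGetD R (i + 1) 0 then "plus" else "minus")

-- structural sign sequence of a list (equal neighbours skipped)
def sigL : List Int → List String
  | a :: b :: t => (if a < b then ["plus"] else if b < a then ["minus"] else []) ++ sigL (b :: t)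
  | _ => []

-- adjacent-equality count of f :: l
def pvE : String → List String → Int
  | _, [] => 0
  | f, s :: t => (if f = s then 1 else 0) + pvE s t

-- adjacent-inequality count of f :: l
def pvNE : String → List String → Int
  | _, [] => 0
  | f, s :: t => (if f = s then 0 else 1) + pvNE s t

-- the B-side comp loop body, syntactically identical to the lambda inside `solve_alt`
def pvStepB (acc : List Int) (x : Int) : List Int :=
  match acc.getLast? with
  | none => acc ++ [x]
  | some y => if y ≠ x then acc ++ [x] else acc

-- destutter of l relative to a previous value y
def pvDst : Int → List Int → List Int
  | _, [] => []
  | y, x :: t => if y ≠ x then x :: pvDst x t else pvDst y t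

lemma pvSig_mem (R : List Int) (is : List Int) (s : String) (h : s ∈ pvSig R is) :
    s = "plus" ∨ s = "minus" := by
  unfold pvSig at h
  rcases List.mem_map.1 h with ⟨i, _, rfl⟩
  split_ifs <;> simp

lemma pvFoldA (R : List Int) : ∀ (is : List Int) (a0 : Int) (f0 : String),
    f0 = "" ∨ f0 = "plus" ∨ f0 = "minus" →
    is.foldl (pvStepA R) (a0, f0) =
      (a0 - ((is.length : Int) - ((pvSig R is).length : Int)) - pvE f0 (pvSig R is),
       (pvSig R is).getLastD f0) := by
  intro is
  induction is with
  | nil => intro a0 f0 _; simp [pvSig, pvE]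
  | cons i t ih =>
    intro a0 f0 hf0
    rcases lt_trichotomy (PySem.List.pyGetD R i 0) (PySem.List.pyGetD R (i + 1) 0) with h | h | h
    · -- "plus"
      have hsig : pvSig R (i :: t) = "plus" :: pvSig R t := by
        simp [pvSig, h, ne_of_lt h]
      have hstep : pvStepA R (a0, f0) i =
          (a0 - (if f0 = "plus" then 1 else 0), "plus") := by
        unfold pvStepA
        rcases hf0 with rfl | rfl | rfl <;> simp [h]
      rw [List.foldl_cons, hstep, ih _ _ (Or.inr (Or.inl rfl)), hsig, Prod.mk.injEq]
      refine ⟨?_, List.getLastD_cons.symm⟩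
      simp only [pvE, List.length_cons]
      push_cast
      split_ifs <;> ring
    · -- "zero"
      have hsig : pvSig R (i :: t) = pvSig R t := by
        simp [pvSig, h]
      have hstep : pvStepA R (a0, f0) i = (a0 - 1, f0) := by
        unfold pvStepA; simp [h]
      rw [List.foldl_cons, hstep, ih _ _ hf0, hsig, Prod.mk.injEq]
      refine ⟨?_, rfl⟩
      simp only [List.length_cons]
      push_cast
      ring
    · -- "minus"
      have hsig : pvSig R (i :: t) = "minus" :: pvSig R t := by
        simp [pvSig, (ne_of_lt h).symm, not_lt.2 (le_of_lt h)]
      have hstep : pvStepA R (a0, f0) i =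
          (a0 - (if f0 = "minus" then 1 else 0), "minus") := by
        unfold pvStepA
        rcases hf0 with rfl | rfl | rfl <;> simp [h, not_lt.2 (le_of_lt h)]
      rw [List.foldl_cons, hstep, ih _ _ (Or.inr (Or.inr rfl)), hsig, Prod.mk.injEq]
      refine ⟨?_, List.getLastD_cons.symm⟩
      simp only [pvE, List.length_cons]
      push_cast
      split_ifs <;> ring

-- pvSig over an index range, structurally
lemma pvSig_append (R : List Int) (xs ys : List Int) :
    pvSig R (xs ++ ys) = pvSig R xs ++ pvSig R ys := by
  simp [pvSig]

lemma sigL_append (xs : List Int) (a b : Int) (h : xs.getLast? = some a) :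
    sigL (xs ++ [b]) =
      sigL xs ++ (if a < b then ["plus"] else if b < a then ["minus"] else []) := by
  induction xs with
  | nil => simp at h
  | cons x t ih =>
    cases t with
    | nil =>
      simp at h
      subst h
      simp [sigL]
    | cons y t' =>
      have h' : (y :: t').getLast? = some a := by
        rwa [List.getLast?_cons_cons] at h
      have := ih h'
      simp only [List.cons_append, sigL] at *
      rw [this, List.append_assoc]

lemma take_getLast? : ∀ (k : Nat) (l : List Int), k < l.length →
    (l.take (k + 1)).getLast? = some (l.getD k 0) := by
  intro k
  induction k with
  | zero =>
    intro l hl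
    cases l with
    | nil => simp at hl
    | cons x t => simp
  | succ k ih =>
    intro l hl
    cases l with
    | nil => simp at hl
    | cons x t =>
      have ht : k < t.length := by simpa using hl
      have := ih t ht
      cases hT : t.take (k + 1) with
      | nil => rw [hT] at this; simp at this
      | cons z zs =>
        rw [List.take_succ_cons, hT, List.getLast?_cons_cons, ← hT, this]
        simp

lemma pvSig_range (R : List Int) : ∀ (n : Nat), n + 1 ≤ R.length →
    pvSig R (PySem.List.pyRange 0 (n : Int) 1) = sigL (R.take (n + 1)) := by
  intro n
  induction n with
  | zero =>
    intro h
    cases R with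
    | nil => simp at h
    | cons x t =>
      rw [PySem.List.pyRange_one_eq_nil (by omega)]
      simp [pvSig, sigL]
  | succ n ih =>
    intro h
    have h' : n + 1 ≤ R.length := by omega
    have hrng : PySem.List.pyRange 0 ((n + 1 : Nat) : Int) 1 =
        PySem.List.pyRange 0 (n : Int) 1 ++ [(n : Int)] := by
      push_cast
      exact PySem.List.pyRange_one_succ_right (by omega)
    rw [hrng, pvSig_append, ih h']
    have htake : R.take (n + 1 + 1) = R.take (n + 1) ++ [R.getD (n + 1) 0] := by
      have hx : R[n+1]? = some (R[n+1]'(by omega)) := List.getElem?_eq_getElem (by omega)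
      rw [List.take_add_one, hx]
      simp [List.getD, hx]
    rw [htake, sigL_append (R.take (n + 1)) (R.getD n 0) _ (take_getLast? n R (by omega))]
    congr 1
    have h1 : PySem.List.pyGetD R ((n : Int)) 0 = R.getD n 0 := PySem.List.pyGetD_natCast R n 0
    have h2 : PySem.List.pyGetD R ((n : Int) + 1) 0 = R.getD (n + 1) 0 := by
      have : ((n : Int) + 1) = ((n + 1 : Nat) : Int) := by push_cast; ring
      rw [this, PySem.List.pyGetD_natCast]
    simp only [pvSig, List.filter_cons, List.filter_nil]
    rcases lt_trichotomy (R[n]?.getD 0) (R[n+1]?.getD 0) with hc | hc | hc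
    · simp [h1, h2, List.getD, hc, ne_of_lt hc]
    · simp [h1, h2, List.getD, hc]
    · simp [h1, h2, List.getD, hc, (ne_of_lt hc).symm, not_lt.2 (le_of_lt hc)]

-- B's comp loop computes x :: pvDst x t
lemma pvFoldB_aux : ∀ (l acc : List Int) (y : Int), acc.getLast? = some y →
    l.foldl pvStepB acc = acc ++ pvDst y l := by
  intro l
  induction l with
  | nil => intro acc y _; simp [pvDst]
  | cons x t ih =>
    intro acc y hy
    rw [List.foldl_cons]
    have hstep : pvStepB acc x = if y ≠ x then acc ++ [x] else acc := by
      simp [pvStepB, hy]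
    rw [hstep]
    by_cases hne : y ≠ x
    · have hlast : (acc ++ [x]).getLast? = some x := by simp
      rw [if_pos hne, ih _ _ hlast]
      simp [pvDst, hne]
    · rw [if_neg hne, ih _ _ hy]
      simp [pvDst, hne]

lemma pvFoldB (x : Int) (t : List Int) :
    (x :: t).foldl pvStepB [] = x :: pvDst x t := by
  rw [List.foldl_cons]
  have h1 : pvStepB [] x = [x] := by simp [pvStepB]
  rw [h1, pvFoldB_aux t [x] x (by simp)]
  simp

-- destuttering does not change the sign sequence
lemma sigL_pvDst : ∀ (t : List Int) (a : Int), sigL (a :: pvDst a t) = sigL (a :: t) := by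
  intro t
  induction t with
  | nil => intro a; simp [pvDst]
  | cons x t' ih =>
    intro a
    by_cases hne : a ≠ x
    · have ha : a ≠ x := hne
      simp only [pvDst, if_pos hne, sigL]
      rw [ih x]
    · push_neg at hne
      subst hne
      have h1 : pvDst a (a :: t') = pvDst a t' := by simp [pvDst]
      have h2 : sigL (a :: a :: t') = sigL (a :: t') := by simp [sigL]
      rw [h1, h2, ih a]

-- the destuttered list has no equal neighbours
lemma pvDst_chain : ∀ (t : List Int) (a : Int),
    List.IsChain (fun u v => u ≠ v) (a :: pvDst a t) := by
  intro t
  induction t with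
  | nil => intro a; simp only [pvDst]; exact List.isChain_singleton a
  | cons x t' ih =>
    intro a
    by_cases hne : a ≠ x
    · simp only [pvDst, if_pos hne]
      exact List.IsChain.cons_cons hne (ih x)
    · push_neg at hne
      subst hne
      have h1 : pvDst a (a :: t') = pvDst a t' := by simp [pvDst]
      rw [h1]
      exact ih a

-- on an adjacent-distinct list, the triple-window fold counts sign inequalities
lemma pvZip3 : ∀ (l : List Int), List.IsChain (fun u v => u ≠ v) l → ∀ (c0 : Int),
    ((l.zip l.tail).zip l.tail.tail).foldl
      (fun c t => if (decide (t.1.1 < t.1.2) != decide (t.1.2 < t.2)) = true then c + 1 else c) c0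
    = c0 + (match sigL l with | [] => 0 | s :: rest => pvNE s rest) := by
  intro l
  induction l with
  | nil => intro _ c0; simp [sigL]
  | cons a t iha =>
    cases t with
    | nil => intro _ c0; simp [sigL]
    | cons b t' =>
      cases t' with
      | nil =>
        intro hch c0
        have hab : a ≠ b := hch.rel
        rcases lt_trichotomy a b with hc | hc | hc
        · simp [sigL, hc, pvNE]
        · exact absurd hc hab
        · simp [sigL, (ne_of_lt hc).symm, not_lt.2 (le_of_lt hc), hc, pvNE]
      | cons d t'' =>
        intro hch c0
        have hab : a ≠ b := hch.rel
        have hch' : List.IsChain (fun u v => u ≠ v) (b :: d :: t'') := hch.tail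
        have hbd : b ≠ d := hch'.rel
        have ih := iha hch'
        -- head of the zip3 list
        have hz : (((a :: b :: d :: t'').zip (a :: b :: d :: t'').tail).zip
            (a :: b :: d :: t'').tail.tail) =
            ((a, b), d) :: (((b :: d :: t'').zip (b :: d :: t'').tail).zip (b :: d :: t'').tail.tail) := by
          simp
        rw [hz, List.foldl_cons, ih]
        have hsig : sigL (a :: b :: d :: t'') =
            (if a < b then "plus" else "minus") :: sigL (b :: d :: t'') := by
          rcases lt_trichotomy a b with hc | hc | hc
          · simp [sigL, hc]
          · exact absurd hc hab
          · simp only [sigL]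
            rw [if_neg (not_lt.2 (le_of_lt hc)), if_pos hc, if_neg (not_lt.2 (le_of_lt hc))]
            simp
        have hsig' : sigL (b :: d :: t'') =
            (if b < d then "plus" else "minus") :: sigL (d :: t'') := by
          rcases lt_trichotomy b d with hc | hc | hc
          · simp [sigL, hc]
          · exact absurd hc hbd
          · simp only [sigL]
            rw [if_neg (not_lt.2 (le_of_lt hc)), if_pos hc, if_neg (not_lt.2 (le_of_lt hc))]
            simp
        rw [hsig, hsig']
        simp only [pvNE]
        have hδ : (if (decide (a < b) != decide (b < d)) = true then c0 + 1 else c0) =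
            c0 + (if (if a < b then "plus" else "minus") = (if b < d then "plus" else "minus")
                  then 0 else 1) := by
          by_cases h1 : a < b <;> by_cases h2 : b < d <;> simp [h1, h2]
        rw [hδ]
        ring

-- equal + unequal adjacent pairs partition all adjacent pairs
lemma pvE_add_pvNE : ∀ (t : List String) (f : String), pvE f t + pvNE f t = (t.length : Int) := by
  intro t
  induction t with
  | nil => intro f; simp [pvE, pvNE]
  | cons s t' ih =>
    intro f
    simp only [pvE, pvNE, List.length_cons]
    have := ih s
    push_cast
    split_ifs <;> omega

lemma pvE_nonneg : ∀ (t : List String) (f : String), 0 ≤ pvE f t := by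
  intro t
  induction t with
  | nil => intro f; simp [pvE]
  | cons s t' ih =>
    intro f
    simp only [pvE]
    have := ih s
    split_ifs <;> omega

-- sigL of an adjacent-distinct list a :: d: empty iff d is empty, else a cons
lemma sigL_chain_nil : ∀ (d : List Int) (a : Int),
    List.IsChain (fun u v => u ≠ v) (a :: d) → (sigL (a :: d) = [] ↔ d = []) := by
  intro d a hch
  cases d with
  | nil => simp [sigL]
  | cons b t =>
    have hab : a ≠ b := hch.rel
    constructor
    · intro hc
      exfalso
      rcases lt_trichotomy a b with h | h | h
      · simp [sigL, h] at hc
      · exact hab h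
      · simp [sigL, not_lt.2 (le_of_lt h), h] at hc
    · intro hc; simp at hc

-- ===== VERDICT (by name: the statement is the Claim_ definition above) =====
theorem solve_spec : Claim_equal_solve := by
  intro R N _ hpre
  unfold Spec_solve
  -- A's value via the fold lemma
  have hfold := pvFoldA R (PySem.List.pyRange 0 (N - 1) 1) N "" (Or.inl rfl)
  have hA : solve R N =
      (if ((PySem.List.pyRange 0 (N - 1) 1).foldl (pvStepA R) (N, "")).1 ≥ 3
       then ((PySem.List.pyRange 0 (N - 1) 1).foldl (pvStepA R) (N, "")).1 else 0) := rfl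
  rw [hA, hfold]
  set s := pvSig R (PySem.List.pyRange 0 (N - 1) 1) with hs
  by_cases hN3 : N < 3
  · -- both sides are 0
    have hB : solve_alt R N = 0 := by unfold solve_alt; rw [if_pos hN3]
    rw [hB]
    have hm : (s.length : Int) ≤ (PySem.List.pyRange 0 (N - 1) 1).length := by
      have : s.length ≤ (PySem.List.pyRange 0 (N - 1) 1).length := by
        rw [hs]; unfold pvSig
        rw [List.length_map]
        exact List.length_filter_le _ _
      exact_mod_cast this
    have hrl : ((PySem.List.pyRange 0 (N - 1) 1).length : Int) ≤ N - 1 ∨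
        (PySem.List.pyRange 0 (N - 1) 1).length = 0 := by
      rw [PySem.List.length_pyRange_one]
      by_cases h : 1 ≤ N
      · left; simp; omega
      · right; simp; omega
    have hE := pvE_nonneg s ""
    rcases hrl with h | h
    · rw [if_neg]; omega
    · have : (PySem.List.pyRange 0 (N - 1) 1).length = 0 := h
      rw [if_neg]
      omega
  · -- N ≥ 3; Pre gives N ≤ R.length
    push_neg at hN3
    have hlen : N ≤ (R.length : Int) := by
      rcases hpre with h | h
      · exact h
      · omega
    -- the structural view of s
    obtain ⟨n, hn⟩ : ∃ n : Nat, N - 1 = (n : Int) := ⟨(N - 1).toNat, by omega⟩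
    have hn1 : n + 1 ≤ R.length := by omega
    have hsig : s = sigL (R.take (n + 1)) := by
      rw [hs, hn]; exact pvSig_range R n hn1
    -- B's value
    have hsliceN : PySem.List.slice R none (some N) = R.take N.toNat :=
      PySem.List.slice_to R (by omega)
    have htakeN : R.take N.toNat = R.take (n + 1) := by
      congr 1; omega
    obtain ⟨x, t, hxt⟩ : ∃ x t, R.take (n + 1) = x :: t := by
      cases hR : R.take (n + 1) with
      | nil =>
        exfalso
        have : (R.take (n + 1)).length = n + 1 := by
          rw [List.length_take]; omega
        rw [hR] at this; simp at this
      | cons x t => exact ⟨x, t, rfl⟩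
    have hcomp : (PySem.List.slice R none (some N)).foldl pvStepB [] = x :: pvDst x t := by
      rw [hsliceN, htakeN, hxt]; exact pvFoldB x t
    set comp := x :: pvDst x t with hcompdef
    have hchain : List.IsChain (fun u v => u ≠ v) comp := pvDst_chain t x
    have hsigcomp : sigL comp = sigL (R.take (n + 1)) := by
      rw [hcompdef, sigL_pvDst, ← hxt]
    have hB : solve_alt R N =
        (if ((comp.length : Nat) : Int) < 2 then 0
         else
           (if (2 : Int) + ((comp.zip (PySem.List.slice comp (some 1) none)).zip
                (PySem.List.slice comp (some 2) none)).foldl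
                (fun c t => if (decide (t.1.1 < t.1.2) != decide (t.1.2 < t.2)) = true then c + 1 else c) 0 ≥ 3
            then (2 : Int) + ((comp.zip (PySem.List.slice comp (some 1) none)).zip
                (PySem.List.slice comp (some 2) none)).foldl
                (fun c t => if (decide (t.1.1 < t.1.2) != decide (t.1.2 < t.2)) = true then c + 1 else c) 0
            else 0)) := by
      have hfun : (fun (acc : List Int) (x : Int) =>
          match acc.getLast? with
          | none => acc ++ [x]
          | some y => if y ≠ x then acc ++ [x] else acc) = pvStepB := rfl
      unfold solve_alt
      rw [if_neg (by omega)]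
      simp only [hfun, hcomp]
    have hslice2 : PySem.List.slice comp (some 2) none = comp.tail.tail := by
      rw [PySem.List.slice_from comp (by omega : (0:Int) ≤ 2)]
      simp [← List.drop_one, List.drop_drop]
    rw [hB, PySem.List.slice_from_one, hslice2]
    have hrlen : ((PySem.List.pyRange 0 (N - 1) 1).length : Int) = N - 1 := by
      rw [PySem.List.length_pyRange_one]; omega
    cases hd : pvDst x t with
    | nil =>
      -- comp = [x]; no sign at all
      have hsnil : s = [] := by
        rw [hsig, ← hsigcomp, hcompdef, hd]
        simp [sigL]
      have hclen : ((comp.length : Nat) : Int) < 2 := by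
        rw [hcompdef, hd]; simp
      rw [hsnil, if_pos hclen]
      have hval : N - (((PySem.List.pyRange 0 (N - 1) 1).length : Int)
          - ((([] : List String)).length : Int)) - pvE "" ([] : List String) = 1 := by
        simp only [pvE, List.length_nil, Int.natCast_zero, sub_zero, hrlen]
        omega
      rw [hval]
      norm_num
    | cons b rest =>
      have hclen : ¬ ((comp.length : Nat) : Int) < 2 := by
        rw [hcompdef, hd]; simp
      rw [if_neg hclen]
      obtain ⟨s0, srest, hs0⟩ : ∃ s0 srest, sigL comp = s0 :: srest := by
        cases hsc : sigL comp with
        | nil =>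
          exfalso
          have := (sigL_chain_nil (pvDst x t) x hchain).1 (by rw [← hcompdef]; exact hsc)
          rw [hd] at this; simp at this
        | cons s0 srest => exact ⟨s0, srest, rfl⟩
      have hchg : (((comp.zip comp.tail).zip comp.tail.tail).foldl
          (fun c t => if (decide (t.1.1 < t.1.2) != decide (t.1.2 < t.2)) = true then c + 1 else c) 0)
          = pvNE s0 srest := by
        rw [pvZip3 comp hchain 0, hs0]
        simp
      have hs' : s = s0 :: srest := by rw [hsig, ← hsigcomp, hs0]
      rw [hchg, hs']
      have hs0ne : s0 ≠ "" := by
        have hmem : s0 ∈ s := by rw [hs']; simp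
        rcases pvSig_mem R _ s0 (by rw [← hs]; exact hmem) with rfl | rfl <;> simp
      have hE0 : pvE "" (s0 :: srest) = pvE s0 srest := by
        simp only [pvE]
        rw [if_neg (fun hc => hs0ne hc.symm)]
        ring
      have hENE := pvE_add_pvNE srest s0
      have hAans : N - (((PySem.List.pyRange 0 (N - 1) 1).length : Int) - ((s0 :: srest).length : Int))
          - pvE "" (s0 :: srest) = 2 + pvNE s0 srest := by
        rw [hrlen, hE0]
        simp only [List.length_cons]
        push_cast
        omega
      simp only [List.length_cons] at hAans ⊢
      rw [hAans]
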